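-- pv_equiv track=rewrite | github.com/rhulha/Quake2-in-Python | qcommon/q_shared.py | q_log2
-- ===== SOURCE A (Python) =====
-- def q_log2(val):
--     """q_log2(val) - returns log base 2 of val"""
--     if val <= 0:
--         return 0
--     result = 0
--     while val > 1:
--         val >>= 1
--         result += 1
--     return result
-- ===== SOURCE B (Python) =====
-- def q_log2(val):
--     """q_log2(val) - returns log base 2 of val"""
--     if val <= 0:
--         return 0
--     return val.bit_length() - 1
-- ===== Notes on version B (the rewrite author's own statement) =====
-- stated objective: idiomatic
-- what changed: Replaces the shift-and-count loop with the closed-form val.bit_length() - 1 after the same non-positive guard.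
import Mathlib
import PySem

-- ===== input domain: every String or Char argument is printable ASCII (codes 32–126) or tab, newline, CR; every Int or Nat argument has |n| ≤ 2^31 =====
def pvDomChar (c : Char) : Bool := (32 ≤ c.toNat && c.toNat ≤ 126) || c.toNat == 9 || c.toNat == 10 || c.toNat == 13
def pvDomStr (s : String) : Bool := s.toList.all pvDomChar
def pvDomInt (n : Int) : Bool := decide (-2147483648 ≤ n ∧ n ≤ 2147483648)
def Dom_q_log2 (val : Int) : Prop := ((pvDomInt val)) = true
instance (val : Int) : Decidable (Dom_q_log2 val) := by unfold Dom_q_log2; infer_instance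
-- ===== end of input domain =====

-- ===== PORT A =====
-- One honest line: B replaces A's shift-and-count loop with the closed form bit_length() - 1.
-- loop lemma needed for termination of the literal port of A's while loop
theorem q_log2_shiftRight_one (val : Int) (h : 0 < val) :
    val >>> (1 : Nat) = PySem.Int.floordiv val 2 := by
  obtain ⟨m, rfl⟩ : ∃ m : Nat, val = m := ⟨val.toNat, by omega⟩
  rw [← Int.natCast_shiftRight, Nat.shiftRight_eq_div_pow]
  have := PySem.Int.floordiv_natCast m 2
  simp_all

-- while val > 1: val >>= 1; result += 1
def q_log2Loop (val result : Int) : Int :=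
  if h : 1 < val then q_log2Loop (val >>> (1 : Nat)) (result + 1) else result
termination_by val.toNat
decreasing_by
  have h2 := q_log2_shiftRight_one val (by omega)
  have h3 := PySem.Int.floordiv_eq_ediv_of_pos (a := val) (b := 2) (by omega)
  omega

def q_log2 (val : Int) : Int :=
  if val ≤ 0 then 0 else q_log2Loop val 0

-- ===== PORT B =====
def q_log2_alt (val : Int) : Int :=
  if val ≤ 0 then 0 else (PySem.Int.bitLength val : Int) - 1

-- ===== PRECONDITION & SPEC =====
def Spec_q_log2 (val : Int) (out : Int) : Prop := out = q_log2_alt val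
instance (val : Int) (out : Int) : Decidable (Spec_q_log2 val out) := by unfold Spec_q_log2; infer_instance

-- ===== CLAIM (what is proved, stated in full; the proofs are below) =====
def Claim_equal_q_log2 : Prop := ∀ (val : Int), Dom_q_log2 val → Spec_q_log2 val (q_log2 val)

-- ===== LEMMAS AND PROOFS =====

theorem q_log2Loop_eq (n : Nat) : ∀ (val result : Int), 0 < val → val.toNat = n →
    q_log2Loop val result = result + (PySem.Int.bitLength val : Int) - 1 := by
  induction n using Nat.strong_induction_on with
  | _ n ih =>
    intro val result hv hn
    rw [q_log2Loop]
    by_cases h : 1 < val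
    · simp only [h, dite_true]
      have hfe := PySem.Int.floordiv_eq_ediv_of_pos (a := val) (b := 2) (by omega : (0:Int) < 2)
      have hfd : 0 < PySem.Int.floordiv val 2 := by omega
      have hlt : (PySem.Int.floordiv val 2).toNat < n := by omega
      rw [q_log2_shiftRight_one val (by omega),
          ih _ hlt _ _ hfd rfl, PySem.Int.bitLength_of_pos hv]
      push_cast
      ring
    · have hv1 : val = 1 := by omega
      subst hv1
      have : PySem.Int.bitLength 1 = 1 := by decide
      simp [this]

-- ===== VERDICT (by name: the statement is the Claim_ definition above) =====
theorem q_log2_spec : Claim_equal_q_log2 := by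
  intro val _
  unfold Spec_q_log2 q_log2 q_log2_alt
  by_cases h : val ≤ 0
  · simp [h]
  · simp only [h, if_false]
    rw [q_log2Loop_eq val.toNat val 0 (by omega) rfl]
    ring
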